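-- pv_equiv track=rewrite | github.com/tedscott/python-stuff | dna_has_stop.py | has_stop
-- ===== SOURCE A (Python) =====
-- def has_stop(dna,frame=0) :
--     "This function returns true if the input string contains a stop codon"
--     stop_codon_found=False
--     # create list of stop codons
--     stop_list=['tga','tag','taa']
--     for i in range(frame,len(dna),3) :
--         codon=dna[i:i+3].lower()
--         if codon in stop_list:
--             stop_codon_found=True
--             break
--     return stop_codon_found
-- ===== SOURCE B (Python) =====
-- def has_stop(dna, frame=0):
--     "This function returns true if the input string contains a stop codon"
--     s = dna.lower()
--     for stop in ("tga", "tag", "taa"):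
--         i = s.find(stop, frame)
--         while i != -1:
--             if (i - frame) % 3 == 0:
--                 return True
--             i = s.find(stop, i + 1)
--     return False
-- ===== Notes on version B (the rewrite author's own statement) =====
-- stated objective: alternative
-- what changed: Instead of A's stride-3 scan that slices and lowercases a codon at every third index, B lowercases the string once and uses str.find to jump between occurrences of each of the three stop codons, accepting the first occurrence aligned to the reading frame ((i - frame) % 3 == 0).
-- outside the precondition, e.g. on has_stop('tgax', -4): A returns True, B returns False
import Mathlib
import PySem

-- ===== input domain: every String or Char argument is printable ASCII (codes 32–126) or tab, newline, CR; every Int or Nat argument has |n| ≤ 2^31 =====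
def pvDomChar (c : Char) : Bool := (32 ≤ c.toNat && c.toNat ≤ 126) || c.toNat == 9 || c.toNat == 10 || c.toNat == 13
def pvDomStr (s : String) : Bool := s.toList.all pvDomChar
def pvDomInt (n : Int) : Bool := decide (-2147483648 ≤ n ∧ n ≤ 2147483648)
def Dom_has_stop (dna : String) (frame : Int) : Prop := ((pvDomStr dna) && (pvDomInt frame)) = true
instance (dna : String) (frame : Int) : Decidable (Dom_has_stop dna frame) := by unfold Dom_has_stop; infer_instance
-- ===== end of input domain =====

-- B replaces A's stride-3 slice-and-compare scan by one lowercasing pass plus str.find jumps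
-- between occurrences of each stop codon, keeping the first frame-aligned hit (alternative algorithm, same cost).


-- ===== PORT A =====
def hasStopLoopA (dna : List Char) (stop_list : List (List Char)) (found : Bool) : List Int → Bool
  | [] => found
  | i :: rest =>
    let codon := PySem.Chars.lower (PySem.List.slice dna (some i) (some (i + 3)))
    if stop_list.contains codon then true
    else hasStopLoopA dna stop_list found rest

def has_stop (dna : String) (frame : Int) : Bool :=
  let stop_list : List (List Char) := ["tga".toList, "tag".toList, "taa".toList]
  hasStopLoopA dna.toList stop_list false (PySem.List.pyRange frame (dna.toList.length : Int) 3)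

-- ===== PORT B =====
-- the 'while i != -1' loop of Source B; fuel (s.length + 1) only makes the recursion structurally
-- total, it is never exhausted for the nonempty substrings B searches for
def findLoopB (s stop : List Char) (frame : Int) (start : Int) : Nat → Bool
  | 0 => false
  | fuel + 1 =>
    let i := PySem.Chars.findFrom s stop start none
    if i = -1 then false
    else if PySem.Int.mod (i - frame) 3 = 0 then true
    else findLoopB s stop frame (i + 1) fuel

def stopsLoopB (s : List Char) (frame : Int) : List (List Char) → Bool
  | [] => false
  | stop :: rest =>
    if findLoopB s stop frame frame (s.length + 1) then true
    else stopsLoopB s frame rest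

def has_stop_alt (dna : String) (frame : Int) : Bool :=
  let s := PySem.Chars.lower dna.toList
  stopsLoopB s frame ["tga".toList, "tag".toList, "taa".toList]

-- ===== PRECONDITION & SPEC =====
-- Pre_ excludes negative frames, on which A still returns a value: there A's slice dna[i:i+3]
-- wraps the negative loop indices to the end of the string (an artefact of Python slicing),
-- while B naturally searches forward from the clamped start of the string.
def Pre_has_stop (dna : String) (frame : Int) : Prop := 0 ≤ frame
instance (dna : String) (frame : Int) : Decidable (Pre_has_stop dna frame) := by
  unfold Pre_has_stop; infer_instance

def pvWitness_has_stop : String × Int := ("atgaxx", 1)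

def Spec_has_stop (dna : String) (frame : Int) (out : Bool) : Prop := out = has_stop_alt dna frame
instance (dna : String) (frame : Int) (out : Bool) : Decidable (Spec_has_stop dna frame out) := by
  unfold Spec_has_stop; infer_instance

-- ===== CLAIM (what is proved, stated in full; the proofs are below) =====
def Claim_equal_has_stop : Prop := ∀ (dna : String) (frame : Int), Dom_has_stop dna frame → Pre_has_stop dna frame → Spec_has_stop dna frame (has_stop dna frame)

-- ===== LEMMAS AND PROOFS =====

-- A's loop is an 'any' over the range
lemma hasStopLoopA_eq_any (dna : List Char) (sl : List (List Char)) (l : List Int) :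
    hasStopLoopA dna sl false l
      = l.any (fun i => sl.contains (PySem.Chars.lower (PySem.List.slice dna (some i) (some (i + 3))))) := by
  induction l with
  | nil => rfl
  | cons i rest ih =>
      simp only [hasStopLoopA, List.any_cons]
      split_ifs with h
      · rw [h, Bool.true_or]
      · rw [Bool.eq_false_iff.mpr h, Bool.false_or, ih]

lemma findLoopB_succ (s stop : List Char) (frame start : Int) (fuel : Nat) :
    findLoopB s stop frame start (fuel + 1) =
      (if PySem.Chars.findFrom s stop start none = -1 then false
       else if PySem.Int.mod (PySem.Chars.findFrom s stop start none - frame) 3 = 0 then true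
       else findLoopB s stop frame (PySem.Chars.findFrom s stop start none + 1) fuel) := rfl

lemma prefix_drop_infix {s t : List Char} {a j : Nat} (haj : a ≤ j) (h : t <+: s.drop j) :
    t <:+: s.drop a := by
  have hd : s.drop j = (s.drop a).drop (j - a) := by
    rw [List.drop_drop]; congr 1; omega
  rw [hd] at h
  exact h.isInfix.trans (List.drop_suffix _ _).isInfix

lemma lt_of_prefix_drop {s t : List Char} {j : Nat} (ht : t ≠ []) (h : t <+: s.drop j) :
    j < s.length := by
  rcases h with ⟨r, hr⟩
  have : s.drop j ≠ [] := by
    intro hnil; rw [hnil] at hr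
    exact ht (List.append_eq_nil_iff.mp hr).1
  have := List.drop_eq_nil_iff.not.mp this
  omega

lemma findFrom_of_len_lt (s sub : List Char) (start : Nat) (h : s.length < start) :
    PySem.Chars.findFrom s sub (start : Int) none = -1 := by
  simp only [PySem.Chars.findFrom]
  have h0 : ¬ ((start : Int) < 0) := by omega
  rw [if_neg h0, if_pos (by exact_mod_cast h)]

-- B's inner while loop finds exactly the frame-aligned occurrences at or after `start`
lemma findLoopB_iff (s stop : List Char) (hstop : stop ≠ []) (frame : Int) :
    ∀ (fuel start : Nat), s.length + 1 ≤ start + fuel →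
      (findLoopB s stop frame (start : Int) fuel = true ↔
        ∃ j : Nat, start ≤ j ∧ stop <+: s.drop j ∧ PySem.Int.mod ((j : Int) - frame) 3 = 0) := by
  intro fuel
  induction fuel with
  | zero =>
      intro start hf
      constructor
      · intro h; simp [findLoopB] at h
      · rintro ⟨j, hj, hpre, -⟩
        exact absurd (lt_of_prefix_drop hstop hpre) (by omega)
  | succ fuel ih =>
      intro start hf
      by_cases hlen : s.length < start
      · -- start past the end: findFrom = -1, and no occurrence exists
        rw [show findLoopB s stop frame start (fuel + 1) = false by
              simp [findLoopB, findFrom_of_len_lt s stop start hlen]]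
        constructor
        · intro h; cases h
        · rintro ⟨j, hj, hpre, -⟩
          exact absurd (lt_of_prefix_drop hstop hpre) (by omega)
      · push_neg at hlen
        by_cases hneg : PySem.Chars.findFrom s stop (start : Int) none = -1
        · rw [show findLoopB s stop frame start (fuel + 1) = false by
                simp [findLoopB, hneg]]
          have hno := (PySem.Chars.findFrom_natCast_eq_neg_one_iff s stop start hlen).mp hneg
          constructor
          · intro h; cases h
          · rintro ⟨j, hj, hpre, -⟩
            exact absurd (prefix_drop_infix hj hpre) hno
        · obtain ⟨hge, hpre, hmin⟩ := PySem.Chars.findFrom_natCast_spec s stop start hlen hneg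
          rw [findLoopB_succ, if_neg hneg]
          generalize hgen : PySem.Chars.findFrom s stop (start : Int) none = i at hneg hge hpre hmin ⊢
          have hi0 : 0 ≤ i := le_trans (by omega) hge
          have hstartle : start ≤ i.toNat := by omega
          have hjlt : i.toNat < s.length := lt_of_prefix_drop hstop hpre
          by_cases hmod : PySem.Int.mod (i - frame) 3 = 0
          · rw [if_pos hmod]
            constructor
            · intro _
              refine ⟨i.toNat, hstartle, hpre, ?_⟩
              rwa [Int.toNat_of_nonneg hi0]
            · intro _; rfl
          · rw [if_neg hmod, show i + 1 = ((i.toNat + 1 : Nat) : Int) by omega,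
                ih (i.toNat + 1) (by omega)]
            constructor
            · rintro ⟨j, hj, hp, hm⟩
              exact ⟨j, by omega, hp, hm⟩
            · rintro ⟨j, hj, hp, hm⟩
              refine ⟨j, ?_, hp, hm⟩
              rcases lt_trichotomy j i.toNat with hlt | heq | hgt
              · exact absurd hp (hmin j hj hlt)
              · exfalso; apply hmod
                rw [heq, Int.toNat_of_nonneg hi0] at hm
                exact hm
              · omega

-- a length-3 codon equals a 3-char take iff it is a prefix of the dropped list
lemma take_three_eq_iff {l t : List Char} (ht : t.length = 3) :
    (l.take 3 = t) ↔ t <+: l := by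
  constructor
  · intro h; rw [← h]; exact List.take_prefix 3 l
  · intro h
    have := List.prefix_iff_eq_take.mp h
    rw [ht] at this; exact this.symm

lemma length_lower (s : List Char) : (PySem.Chars.lower s).length = s.length := by
  simp [PySem.Chars.lower]

lemma lower_drop_take (s : List Char) (j : Nat) :
    PySem.Chars.lower ((s.drop j).take 3) = ((PySem.Chars.lower s).drop j).take 3 := by
  simp [PySem.Chars.lower, List.map_take, List.map_drop]

-- ===== VERDICT (by name: the statement is the Claim_ definition above) =====
theorem has_stop_spec : Claim_equal_has_stop := by
  intro dna frame _ hpre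
  unfold Spec_has_stop has_stop has_stop_alt
  simp only []
  set s := PySem.Chars.lower dna.toList with hs
  have hslen : s.length = dna.toList.length := length_lower dna.toList
  have hfr : ((frame.toNat : Int)) = frame := Int.toNat_of_nonneg hpre
  -- characterize each side
  rw [hasStopLoopA_eq_any]
  -- condition under which either side is true
  have cond : ∀ t : List Char, t.length = 3 → t ≠ [] →
      ((∃ i : Int, i ∈ PySem.List.pyRange frame (dna.toList.length : Int) 3 ∧
          PySem.Chars.lower (PySem.List.slice dna.toList (some i) (some (i + 3))) = t)
        ↔ (∃ j : Nat, frame.toNat ≤ j ∧ t <+: s.drop j ∧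
            PySem.Int.mod ((j : Int) - frame) 3 = 0)) := by
    intro t ht htne
    constructor
    · rintro ⟨i, hmem, hcod⟩
      obtain ⟨hle, hlt, hdvd⟩ := (PySem.List.mem_pyRange_iff_of_pos (by norm_num) i).mp hmem
      have hi0 : 0 ≤ i := le_trans hpre hle
      have hslice : PySem.List.slice dna.toList (some i) (some (i + 3))
          = (dna.toList.drop i.toNat).take 3 := by
        rw [PySem.List.slice_toNat _ hi0 (by omega)]
        congr 1; omega
      rw [hslice, lower_drop_take] at hcod
      refine ⟨i.toNat, by omega, (take_three_eq_iff ht).mp hcod, ?_⟩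
      rw [Int.toNat_of_nonneg hi0, PySem.Int.mod_eq_zero_iff_dvd]
      exact hdvd
    · rintro ⟨j, hj, hp, hm⟩
      refine ⟨(j : Int), ?_, ?_⟩
      · rw [PySem.List.mem_pyRange_iff_of_pos (by norm_num)]
        refine ⟨by omega, ?_, ?_⟩
        · have := lt_of_prefix_drop htne hp
          omega
        · exact (PySem.Int.mod_eq_zero_iff_dvd _ _).mp hm
      · have hslice : PySem.List.slice dna.toList (some (j : Int)) (some ((j : Int) + 3))
            = (dna.toList.drop j).take 3 := by
          rw [PySem.List.slice_toNat _ (by omega) (by omega)]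
          congr 1 <;> omega
        rw [hslice, lower_drop_take]
        exact (take_three_eq_iff ht).mpr hp
  -- now both sides are three-way disjunctions over the stop codons
  have hB : ∀ t : List Char, t ≠ [] →
      (findLoopB s t frame frame (s.length + 1) = true ↔
        ∃ j : Nat, frame.toNat ≤ j ∧ t <+: s.drop j ∧
          PySem.Int.mod ((j : Int) - frame) 3 = 0) := by
    intro t htne
    have h := findLoopB_iff s t htne frame (s.length + 1) frame.toNat (by omega)
    rwa [hfr] at h
  rcases hA : (PySem.List.pyRange frame (dna.toList.length : Int) 3).any
      (fun i => [("tga".toList : List Char), "tag".toList, "taa".toList].contains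
        (PySem.Chars.lower (PySem.List.slice dna.toList (some i) (some (i + 3))))) with _ | _
  · -- A is false: show B is false
    symm
    rw [Bool.eq_false_iff]
    intro hBtrue
    have hAex : ∃ i : Int, i ∈ PySem.List.pyRange frame (dna.toList.length : Int) 3 ∧
        ∃ t ∈ [("tga".toList : List Char), "tag".toList, "taa".toList],
          PySem.Chars.lower (PySem.List.slice dna.toList (some i) (some (i + 3))) = t := by
      -- from B true
      have : ∃ t ∈ [("tga".toList : List Char), "tag".toList, "taa".toList],
          findLoopB s t frame frame (s.length + 1) = true := by
        simp only [stopsLoopB] at hBtrue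
        split_ifs at hBtrue with h1 h2 h3
        · exact ⟨_, by simp, h1⟩
        · exact ⟨_, by simp, h2⟩
        · exact ⟨_, by simp, h3⟩
      obtain ⟨t, htmem, htloop⟩ := this
      have ht3 : t.length = 3 := by
        fin_cases htmem <;> rfl
      have htne : t ≠ [] := by
        fin_cases htmem <;> simp
      obtain ⟨j, hj, hp, hm⟩ := (hB t htne).mp htloop
      obtain ⟨i, hmem, hcod⟩ := (cond t ht3 htne).mpr ⟨j, hj, hp, hm⟩
      exact ⟨i, hmem, t, htmem, hcod⟩
    obtain ⟨i, hmem, t, htmem, hcod⟩ := hAex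
    have : (PySem.List.pyRange frame (dna.toList.length : Int) 3).any
        (fun i => [("tga".toList : List Char), "tag".toList, "taa".toList].contains
          (PySem.Chars.lower (PySem.List.slice dna.toList (some i) (some (i + 3))))) = true := by
      rw [List.any_eq_true]
      exact ⟨i, hmem, by simp [hcod]; fin_cases htmem <;> simp⟩
    rw [hA] at this; cases this
  · -- A is true: show B is true
    symm
    rw [List.any_eq_true] at hA
    obtain ⟨i, hmem, hcont⟩ := hA
    rw [List.contains_eq_mem, decide_eq_true_iff] at hcont
    have : ∃ t ∈ [("tga".toList : List Char), "tag".toList, "taa".toList],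
        PySem.Chars.lower (PySem.List.slice dna.toList (some i) (some (i + 3))) = t :=
      ⟨_, hcont, rfl⟩
    obtain ⟨t, htmem, hcod⟩ := this
    have ht3 : t.length = 3 := by fin_cases htmem <;> rfl
    have htne : t ≠ [] := by fin_cases htmem <;> simp
    obtain ⟨j, hj, hp, hm⟩ := (cond t ht3 htne).mp ⟨i, hmem, hcod⟩
    have hloop : findLoopB s t frame frame (s.length + 1) = true :=
      (hB t htne).mpr ⟨j, hj, hp, hm⟩
    fin_cases htmem <;> (simp only [stopsLoopB]; split_ifs <;> simp_all)
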